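-- pv_equiv track=rewrite | github.com/AdamWithATea/AdventOfCode | Python/2021/Day01.py | Part1
-- ===== SOURCE A (Python) =====
-- def Part1(measurements):
--     increases = 0
--     previousDepth = None
--
--     for depth in measurements:
--         #Increment if this isn't the first measurement and the depth has increased
--         if previousDepth != None and depth > previousDepth:
--             increases += 1
--         previousDepth = depth
--
--     return str(increases)
-- ===== SOURCE B (Python) =====
-- def Part1(measurements):
--     xs = list(measurements)
--
--     def count(lo, hi):
--         # increases among adjacent pairs with both indices in [lo, hi)
--         if hi <= lo + 1:
--             return 0
--         mid = (lo + hi) // 2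
--         return count(lo, mid) + count(mid, hi) + (xs[mid] > xs[mid - 1])
--
--     return str(count(0, len(xs)))
-- ===== Notes on version B (the rewrite author's own statement) =====
-- stated objective: alternative
-- what changed: Replaced the sentinel-tracking left-to-right fold with a divide-and-conquer recursion that splits the index range in half, counts increases in each half and adds the single boundary comparison.
import Mathlib
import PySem

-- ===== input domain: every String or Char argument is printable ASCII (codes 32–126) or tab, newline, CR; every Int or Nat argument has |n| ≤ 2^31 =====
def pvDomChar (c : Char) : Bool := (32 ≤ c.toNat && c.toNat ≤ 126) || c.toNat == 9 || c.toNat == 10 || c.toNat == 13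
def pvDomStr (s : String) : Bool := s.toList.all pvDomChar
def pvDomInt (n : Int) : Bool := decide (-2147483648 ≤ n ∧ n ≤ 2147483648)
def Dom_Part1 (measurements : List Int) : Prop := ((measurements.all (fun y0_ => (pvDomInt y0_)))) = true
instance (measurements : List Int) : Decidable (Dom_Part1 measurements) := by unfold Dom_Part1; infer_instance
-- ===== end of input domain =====

-- B replaces A's sentinel-tracking single pass by a divide-and-conquer recursion on the
-- index range (halves plus one boundary comparison); alternative decomposition, same cost.

-- ===== PORT A =====
-- one loop step: state is (increases, previousDepth)
def part1StepA (st : Int × Option Int) (depth : Int) : Int × Option Int :=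
  match st with
  | (increases, none) => (increases, some depth)
  | (increases, some previousDepth) =>
      (if depth > previousDepth then increases + 1 else increases, some depth)

def Part1 (measurements : List Int) : String :=
  PySem.Int.toStr (measurements.foldl part1StepA (0, none)).1

-- ===== PORT B =====
-- count(lo, hi) of Source B; within Part1_alt's calls lo-1 < mid-1 and mid are always valid
-- indices, so getD is exact for Python's xs[mid], xs[mid-1] there.
def part1Count (xs : List Int) (lo hi : Nat) : Int :=
  if hi ≤ lo + 1 then 0
  else
    let mid := (lo + hi) / 2
    part1Count xs lo mid + part1Count xs mid hi +
      (if xs.getD mid 0 > xs.getD (mid - 1) 0 then 1 else 0)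
termination_by hi - lo
decreasing_by all_goals omega

def Part1_alt (measurements : List Int) : String :=
  PySem.Int.toStr (part1Count measurements 0 measurements.length)

-- ===== PRECONDITION & SPEC =====
def Spec_Part1 (measurements : List Int) (out : String) : Prop := out = Part1_alt measurements
instance (measurements : List Int) (out : String) : Decidable (Spec_Part1 measurements out) := by unfold Spec_Part1; infer_instance

-- ===== CLAIM (what is proved, stated in full; the proofs are below) =====
def Claim_equal_Part1 : Prop := ∀ (measurements : List Int), Dom_Part1 measurements → Spec_Part1 measurements (Part1 measurements)

-- ===== LEMMAS AND PROOFS =====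
-- indicator of an increase at absolute index i (compared with index i-1)
def pvInd (xs : List Int) (i : Nat) : Int :=
  if xs.getD i 0 > xs.getD (i - 1) 0 then 1 else 0

theorem part1Count_eq (xs : List Int) :
    ∀ (n lo hi : Nat), hi - lo ≤ n →
      part1Count xs lo hi = ∑ i ∈ Finset.Ico (lo + 1) hi, pvInd xs i := by
  intro n
  induction n with
  | zero =>
      intro lo hi h
      rw [part1Count, if_pos (by omega), Finset.Ico_eq_empty (by omega), Finset.sum_empty]
  | succ n ih =>
      intro lo hi h
      by_cases hsmall : hi ≤ lo + 1
      · rw [part1Count, if_pos hsmall, Finset.Ico_eq_empty (by omega), Finset.sum_empty]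
      · rw [part1Count, if_neg hsmall]
        show part1Count xs lo ((lo + hi) / 2) + part1Count xs ((lo + hi) / 2) hi +
              (if xs.getD ((lo + hi) / 2) 0 > xs.getD ((lo + hi) / 2 - 1) 0 then 1 else 0) =
            ∑ i ∈ Finset.Ico (lo + 1) hi, pvInd xs i
        have hmid1 : lo + 1 ≤ (lo + hi) / 2 := by omega
        have hmid2 : (lo + hi) / 2 < hi := by omega
        rw [ih lo ((lo + hi) / 2) (by omega), ih ((lo + hi) / 2) hi (by omega)]
        rw [← Finset.sum_Ico_consecutive (pvInd xs) hmid1 (le_of_lt hmid2)]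
        rw [Finset.sum_eq_sum_Ico_succ_bot hmid2 (pvInd xs)]
        simp only [pvInd]
        ring

-- A's loop after the first element, expressed with absolute indices
theorem part1_foldA (xs : List Int) :
    ∀ (m k : Nat) (n : Int), xs.length - k = m → k < xs.length →
      ((xs.drop (k + 1)).foldl part1StepA (n, some (xs.getD k 0))).1 =
        n + ∑ i ∈ Finset.Ico (k + 1) xs.length, pvInd xs i := by
  intro m
  induction m with
  | zero => intro k n hm hk; omega
  | succ m ih =>
      intro k n hm hk
      by_cases hlast : k + 1 < xs.length
      · rw [List.drop_eq_getElem_cons hlast, List.foldl_cons]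
        have hget : xs[k + 1] = xs.getD (k + 1) 0 := by
          simp [List.getD, List.getElem?_eq_getElem hlast]
        simp only [part1StepA, hget]
        rw [ih (k + 1) _ (by omega) hlast]
        rw [Finset.sum_eq_sum_Ico_succ_bot (by omega : k + 1 < xs.length) (pvInd xs)]
        have : pvInd xs (k + 1) = if xs.getD (k + 1) 0 > xs.getD k 0 then 1 else 0 := by
          simp [pvInd]
        rw [this]
        split_ifs <;> ring
      · rw [List.drop_eq_nil_of_le (by omega), List.foldl_nil]
        rw [Finset.Ico_eq_empty (by omega), Finset.sum_empty]
        simp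

-- ===== VERDICT (by name: the statement is the Claim_ definition above) =====
theorem Part1_spec : Claim_equal_Part1 := by
  intro measurements _
  unfold Spec_Part1 Part1 Part1_alt
  cases measurements with
  | nil =>
      simp only [List.length_nil, List.foldl_nil]
      rw [part1Count]
      norm_num
  | cons d t =>
      simp only [List.foldl_cons, part1StepA]
      have h1 := part1_foldA (d :: t) ((d :: t).length) 0 0 (by simp) (by simp)
      simp only [Nat.zero_add, List.drop_succ_cons, List.drop_zero, List.getD_cons_zero] at h1
      rw [h1, part1Count_eq (d :: t) (d :: t).length 0 (d :: t).length (by omega)]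
      simp
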